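-- pv_equiv track=rewrite | github.com/Semeriuss/A2SV-Labs | practice_problems/46. sherlockAndTheBeast.py | findDecentDigits
-- ===== SOURCE A (Python) =====
-- def findDecentDigits(n, fives):
--     if n < 3:
--         return 0, 0
--     if n % 3 == 0:
--         n = 0
--         return n, fives
--     else:
--         fives -= 5
--         n -= 5
--         return findDecentDigits(n, fives)
-- ===== SOURCE B (Python) =====
-- def findDecentDigits(n, fives):
--     # Closed form: subtracting 5 raises n mod 3 by 1, so at most two steps are
--     # ever taken; decide the answer directly from n % 3 and n's size.
--     if n < 3:
--         return 0, 0
--     r = n % 3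
--     if r == 0:
--         return 0, fives
--     if r == 2:
--         return (0, fives - 5) if n >= 8 else (0, 0)
--     return (0, fives - 10) if n >= 13 else (0, 0)
-- ===== Notes on version B (the rewrite author's own statement) =====
-- stated objective: alternative
-- what changed: Replaces the recursive subtract-5-and-retry process with a closed-form case split on n % 3 and two size thresholds (n>=8, n>=13), with no recursion or loop; same cost since A recurses at most twice.
import Mathlib
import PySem

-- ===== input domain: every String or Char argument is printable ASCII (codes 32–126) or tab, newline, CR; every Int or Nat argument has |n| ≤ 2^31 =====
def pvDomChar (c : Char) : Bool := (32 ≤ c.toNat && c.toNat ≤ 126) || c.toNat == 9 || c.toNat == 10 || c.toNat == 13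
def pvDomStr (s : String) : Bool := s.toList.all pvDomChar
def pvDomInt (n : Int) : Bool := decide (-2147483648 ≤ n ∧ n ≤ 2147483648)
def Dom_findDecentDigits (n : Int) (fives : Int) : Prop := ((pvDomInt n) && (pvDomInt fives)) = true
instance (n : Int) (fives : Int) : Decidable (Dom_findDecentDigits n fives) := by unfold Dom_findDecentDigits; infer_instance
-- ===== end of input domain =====

-- B replaces A's recursion with a closed-form case split on n % 3; same results, no recursion.

-- ===== PORT A =====
def findDecentDigits (n : Int) (fives : Int) : Int × Int :=
  if n < 3 then (0, 0)
  else if PySem.Int.mod n 3 = 0 then (0, fives)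
  else findDecentDigits (n - 5) (fives - 5)
termination_by n.toNat
decreasing_by omega

-- ===== PORT B =====
def findDecentDigits_alt (n : Int) (fives : Int) : Int × Int :=
  if n < 3 then (0, 0)
  else
    let r := PySem.Int.mod n 3
    if r = 0 then (0, fives)
    else if r = 2 then (if n ≥ 8 then (0, fives - 5) else (0, 0))
    else (if n ≥ 13 then (0, fives - 10) else (0, 0))

-- ===== PRECONDITION & SPEC =====
def Spec_findDecentDigits (n : Int) (fives : Int) (out : Int × Int) : Prop := out = findDecentDigits_alt n fives
instance (n : Int) (fives : Int) (out : Int × Int) : Decidable (Spec_findDecentDigits n fives out) := by unfold Spec_findDecentDigits; infer_instance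

-- ===== CLAIM (what is proved, stated in full; the proofs are below) =====
def Claim_equal_findDecentDigits : Prop := ∀ (n : Int) (fives : Int), Dom_findDecentDigits n fives → Spec_findDecentDigits n fives (findDecentDigits n fives)

-- ===== LEMMAS AND PROOFS =====

-- One A-step preserves B's value: for n ≥ 3 with n % 3 ≠ 0, B at (n-5, fives-5) equals B at (n, fives).
theorem alt_step (n fives : Int) (h3 : ¬ n < 3) (hm : PySem.Int.mod n 3 ≠ 0) :
    findDecentDigits_alt (n - 5) (fives - 5) = findDecentDigits_alt n fives := by
  simp only [findDecentDigits_alt, PySem.Int.mod_eq_emod_of_pos (a := n) (by omega : (0:Int) < 3),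
    PySem.Int.mod_eq_emod_of_pos (a := n - 5) (by omega : (0:Int) < 3)] at *
  split_ifs <;> simp only [Prod.mk.injEq, true_and, and_true] <;> omega

theorem findDecentDigits_eq_alt (n fives : Int) :
    findDecentDigits n fives = findDecentDigits_alt n fives := by
  rw [findDecentDigits]
  split_ifs with h1 h2
  · simp only [findDecentDigits_alt, if_pos h1]
  · simp only [findDecentDigits_alt, PySem.Int.mod_eq_emod_of_pos (a := n) (by omega : (0:Int) < 3)] at h2 ⊢
    split_ifs <;> simp only [Prod.mk.injEq, true_and, and_true] <;> omega
  · rw [findDecentDigits_eq_alt (n - 5) (fives - 5), alt_step n fives h1 h2]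
termination_by n.toNat
decreasing_by omega

-- ===== VERDICT (by name: the statement is the Claim_ definition above) =====
theorem findDecentDigits_spec : Claim_equal_findDecentDigits := by
  intro n fives _
  exact findDecentDigits_eq_alt n fives
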